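-- pv_equiv track=rewrite | github.com/timraay/OfferPhase | draftphase/maps.py | get_all_layout_combinations
-- ===== SOURCE A (Python) =====
-- from typing import Any, Generator, TypeAlias
--
-- LayoutType: TypeAlias = tuple[int, int, int]
--
-- def get_all_layout_combinations(midpoint_idx: int | None = None) -> Generator[LayoutType, Any, None]:
--     def _range(o: int):
--         # Only allow for adjacent objectives
--         return range(max(0, o-1), min(3, o+2))
--
--     # for o1 in range(3):
--     #     for o2 in _range(o1):
--     #         for o3 in _range(o2):
--     #             if midpoint_idx is not None and midpoint_idx != o3:
--     #                 continue
--     #             for o4 in _range(o3):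
--     #                 for o5 in _range(o4):
--     #                     yield (o1, o2, o3, o4, o5)
--
--     for o1 in range(3):
--         for o2 in _range(o1):
--             if midpoint_idx is not None and midpoint_idx != o2:
--                 continue
--             for o3 in _range(o2):
--                 yield (o1, o2, o3)
-- ===== SOURCE B (Python) =====
-- def get_all_layout_combinations(midpoint_idx=None):
--     # Generate-all-then-filter: scan the full 3x3x3 product in lexicographic
--     # order and keep triples satisfying the adjacency/midpoint predicate.
--     for o1 in range(3):
--         for o2 in range(3):
--             for o3 in range(3):
--                 if abs(o1 - o2) <= 1 and abs(o2 - o3) <= 1 and (midpoint_idx is None or midpoint_idx == o2):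
--                     yield (o1, o2, o3)
-- ===== Notes on version B (the rewrite author's own statement) =====
-- stated objective: alternative
-- what changed: B scans the full 3x3x3 product in lexicographic order and filters by an explicit adjacency predicate abs(o1-o2)<=1 and abs(o2-o3)<=1 plus the midpoint test, instead of A's constrained nested ranges built by a helper _range with a continue-based midpoint skip.
import Mathlib
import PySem

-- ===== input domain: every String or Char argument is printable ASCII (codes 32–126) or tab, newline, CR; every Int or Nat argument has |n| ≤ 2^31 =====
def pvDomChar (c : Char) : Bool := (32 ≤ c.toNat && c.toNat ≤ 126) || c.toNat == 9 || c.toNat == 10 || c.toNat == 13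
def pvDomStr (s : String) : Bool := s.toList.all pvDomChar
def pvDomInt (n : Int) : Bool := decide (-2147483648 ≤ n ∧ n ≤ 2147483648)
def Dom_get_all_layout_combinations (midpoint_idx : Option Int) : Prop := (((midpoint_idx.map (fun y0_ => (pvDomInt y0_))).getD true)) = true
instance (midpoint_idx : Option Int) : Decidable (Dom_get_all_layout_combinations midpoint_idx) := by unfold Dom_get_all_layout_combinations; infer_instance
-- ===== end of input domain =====

-- B replaces A's constrained nested ranges (helper _range + continue) by one full
-- 3×3×3 lexicographic scan filtered by an explicit adjacency predicate; objective: alternative.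
-- The Python versions are generators; the ports return the list of yielded triples.

-- ===== PORT A =====
-- _range(o) = range(max(0, o-1), min(3, o+2))
def pyA_range (o : Int) : List Int := PySem.List.pyRange (max 0 (o - 1)) (min 3 (o + 2)) 1

def get_all_layout_combinations (midpoint_idx : Option Int) : List (Int × Int × Int) :=
  (PySem.List.pyRange 0 3 1).foldl (fun acc o1 =>
    (pyA_range o1).foldl (fun acc o2 =>
      if midpoint_idx ≠ none ∧ midpoint_idx ≠ some o2 then acc
      else (pyA_range o2).foldl (fun acc o3 => acc ++ [(o1, o2, o3)]) acc) acc) []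

-- ===== PORT B =====
def get_all_layout_combinations_alt (midpoint_idx : Option Int) : List (Int × Int × Int) :=
  (PySem.List.pyRange 0 3 1).foldl (fun acc o1 =>
    (PySem.List.pyRange 0 3 1).foldl (fun acc o2 =>
      (PySem.List.pyRange 0 3 1).foldl (fun acc o3 =>
        if (o1 - o2).natAbs ≤ 1 ∧ (o2 - o3).natAbs ≤ 1 ∧ (midpoint_idx = none ∨ midpoint_idx = some o2)
        then acc ++ [(o1, o2, o3)] else acc) acc) acc) []

-- ===== PRECONDITION & SPEC =====
def Spec_get_all_layout_combinations (midpoint_idx : Option Int) (out : List (Int × Int × Int)) : Prop := out = get_all_layout_combinations_alt midpoint_idx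
instance (midpoint_idx : Option Int) (out : List (Int × Int × Int)) : Decidable (Spec_get_all_layout_combinations midpoint_idx out) := by unfold Spec_get_all_layout_combinations; infer_instance

-- ===== CLAIM (what is proved, stated in full; the proofs are below) =====
def Claim_equal_get_all_layout_combinations : Prop := ∀ (midpoint_idx : Option Int), Dom_get_all_layout_combinations midpoint_idx → Spec_get_all_layout_combinations midpoint_idx (get_all_layout_combinations midpoint_idx)

-- ===== LEMMAS AND PROOFS =====
lemma pyRange03 : PySem.List.pyRange 0 3 1 = [0, 1, 2] := by decide

-- both programs ignore a midpoint value outside {0,1,2}: each yields nothing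
lemma both_empty_of_far (m : Int) (h0 : m ≠ 0) (h1 : m ≠ 1) (h2 : m ≠ 2) :
    get_all_layout_combinations (some m) = [] ∧
    get_all_layout_combinations_alt (some m) = [] := by
  have e0 : pyA_range 0 = [0, 1] := by decide
  have e1 : pyA_range 1 = [0, 1, 2] := by decide
  have e2 : pyA_range 2 = [1, 2] := by decide
  constructor <;>
    simp [get_all_layout_combinations, get_all_layout_combinations_alt,
      pyRange03, e0, e1, e2, List.foldl, h0, h1, h2]

-- ===== VERDICT (by name: the statement is the Claim_ definition above) =====
theorem get_all_layout_combinations_spec : Claim_equal_get_all_layout_combinations := by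
  intro mi _
  unfold Spec_get_all_layout_combinations
  cases mi with
  | none => decide
  | some m =>
    by_cases h0 : m = 0
    · subst h0; decide
    by_cases h1 : m = 1
    · subst h1; decide
    by_cases h2 : m = 2
    · subst h2; decide
    obtain ⟨ha, hb⟩ := both_empty_of_far m h0 h1 h2
    rw [ha, hb]
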